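-- pv_equiv track=rewrite | github.com/SAY-5/SpatialPathDB | spdb/hilbert.py | hilbert_range_for_bbox
-- ===== SOURCE A (Python) =====
-- def _rot(n: int, x: int, y: int, rx: int, ry: int):
--     """Rotate/flip quadrant."""
--     if ry == 0:
--         if rx == 1:
--             x = n - 1 - x
--             y = n - 1 - y
--         x, y = y, x
--     return x, y
--
-- def xy2d(p: int, x: int, y: int) -> int:
--     """Convert (x, y) in a 2^p grid to Hilbert index d."""
--     n = 1 << p
--     d = 0
--     s = n >> 1
--     while s > 0:
--         rx = 1 if (x & s) > 0 else 0
--         ry = 1 if (y & s) > 0 else 0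
--         d += s * s * ((3 * rx) ^ ry)
--         x, y = _rot(s, x, y, rx, ry)
--         s >>= 1
--     return d
--
-- def hilbert_range_for_bbox(x_min, y_min, x_max, y_max, w, h, p):
--     """Return the set of Hilbert keys for corners of a bounding box.
--
--     Used by the query planner to identify candidate Hilbert buckets.
--     Returns (h_min, h_max) spanning the range of all corner keys.
--     """
--     n = 1 << p
--     corners_x = [x_min, x_min, x_max, x_max]
--     corners_y = [y_min, y_max, y_min, y_max]
--     gxs = [max(0, min(n - 1, int(cx * n / w))) for cx in corners_x]
--     gys = [max(0, min(n - 1, int(cy * n / h))) for cy in corners_y]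
--     h_vals = [xy2d(p, gx, gy) for gx, gy in zip(gxs, gys)]
--     return min(h_vals), max(h_vals)
-- ===== SOURCE B (Python) =====
-- # Table-driven Hilbert index: a 4-state DFA over the interleaved coordinate
-- # bits replaces A's per-level rotate/flip loop; the grid mapping keeps A's
-- # exact int(c * n / denom) float truncation and [0, n-1] clamping.
--
-- # DIGIT[state][2*bx+by] = Hilbert digit, NEXT[state][2*bx+by] = next state.
-- _DIGIT = ((0, 1, 3, 2), (0, 3, 1, 2), (2, 1, 3, 0), (2, 3, 1, 0))
-- _NEXT = ((1, 0, 2, 0), (0, 3, 1, 1), (2, 2, 0, 3), (3, 1, 3, 2))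
--
--
-- def _hilbert_d(p, x, y):
--     """Hilbert index of (x, y) via a state machine on the bit pairs (MSB first)."""
--     d = 0
--     st = 0
--     for i in range(p - 1, -1, -1):
--         bx = x // (1 << i) % 2
--         by = y // (1 << i) % 2
--         q = 2 * bx + by
--         d = d * 4 + _DIGIT[st][q]
--         st = _NEXT[st][q]
--     return d
--
--
-- def _grid(c, n, denom):
--     """Clamped grid cell, with A's float-division truncation."""
--     return max(0, min(n - 1, int(c * n / denom)))
--
--
-- def hilbert_range_for_bbox(x_min, y_min, x_max, y_max, w, h, p):
--     n = 1 << p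
--     gx0 = _grid(x_min, n, w)
--     gx1 = _grid(x_max, n, w)
--     gy0 = _grid(y_min, n, h)
--     gy1 = _grid(y_max, n, h)
--     d00 = _hilbert_d(p, gx0, gy0)
--     d01 = _hilbert_d(p, gx0, gy1)
--     d10 = _hilbert_d(p, gx1, gy0)
--     d11 = _hilbert_d(p, gx1, gy1)
--     return min(d00, d01, d10, d11), max(d00, d01, d10, d11)
-- ===== Notes on version B (the rewrite author's own statement) =====
-- stated objective: alternative
-- what changed: B replaces A's per-level rotate/flip Hilbert loop (xy2d with coordinate mutation) by a 4-state table-driven DFA over the interleaved coordinate bits (digit/next-state lookup tables, accumulator d = 4*d + digit), computing the four corner indices directly instead of via corner lists/zip/min over a list; the int(cx*n/w) grid mapping and clamping are kept verbatim.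
import Mathlib
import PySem

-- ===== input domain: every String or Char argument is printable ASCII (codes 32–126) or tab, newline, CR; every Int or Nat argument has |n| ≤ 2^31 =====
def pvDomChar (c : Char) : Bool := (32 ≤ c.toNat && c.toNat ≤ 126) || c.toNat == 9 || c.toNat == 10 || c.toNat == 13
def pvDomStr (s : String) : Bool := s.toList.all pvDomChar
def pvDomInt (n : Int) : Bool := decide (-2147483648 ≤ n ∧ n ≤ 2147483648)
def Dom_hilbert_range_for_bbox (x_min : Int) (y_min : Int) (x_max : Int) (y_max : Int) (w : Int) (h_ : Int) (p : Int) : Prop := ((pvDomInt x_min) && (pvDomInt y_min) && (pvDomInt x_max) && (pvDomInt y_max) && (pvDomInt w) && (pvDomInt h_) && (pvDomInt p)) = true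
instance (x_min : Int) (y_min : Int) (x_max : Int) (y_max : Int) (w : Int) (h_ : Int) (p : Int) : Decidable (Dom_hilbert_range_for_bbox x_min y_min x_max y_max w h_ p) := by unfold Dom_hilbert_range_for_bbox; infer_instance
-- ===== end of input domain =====

-- B replaces A's per-level rotate/flip Hilbert loop by a 4-state table-driven DFA over the
-- interleaved coordinate bits; the grid mapping int(cx*n/w) is kept verbatim (objective:
-- alternative algorithm, same asymptotic cost).

-- Shared model of Python's int(a / b) on ints: true division correctly rounded to binary64
-- (round-to-nearest, ties to even), then truncated toward zero. Exact whenever the division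
-- neither overflows (OverflowError, excluded by Pre_) nor produces a subnormal (impossible
-- for the divisor magnitudes Dom admits). Both Pythons contain this builtin expression.
def rdivTruncNat (a b : Nat) : Nat :=
  if a = 0 ∨ b = 0 then 0
  else
    -- exponent f with 2^f ≤ a/b < 2^(f+1)
    let f0 : Int := (Nat.log2 a : Int) - (Nat.log2 b : Int)
    let ok : Bool := if 0 ≤ f0 then decide (b <<< f0.toNat ≤ a) else decide (b ≤ a <<< (-f0).toNat)
    let f : Int := if ok then f0 else f0 - 1
    -- 53-bit significand q = floor(a/b · 2^(52-f)), remainder r decides the rounding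
    let k : Int := 52 - f
    let num : Nat := if 0 ≤ k then a <<< k.toNat else a
    let den : Nat := if 0 ≤ k then b else b <<< (-k).toNat
    let q := num / den
    let r := num % den
    let m : Nat := if den < 2 * r then q + 1
                   else if 2 * r = den then (if q % 2 = 1 then q + 1 else q) else q
    -- value is m·2^(f-52); truncate (floor, since positive)
    let e : Int := f - 52
    if 0 ≤ e then m <<< e.toNat else m >>> (-e).toNat

def pyFloatDivTrunc (num den : Int) : Int :=
  let v : Nat := rdivTruncNat num.natAbs den.natAbs
  if (decide (num < 0)) != (decide (den < 0)) then -(v : Int) else (v : Int)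

-- ===== PORT A =====
def pyRot (n x y rx ry : Int) : Int × Int :=
  if ry = 0 then
    if rx = 1 then
      ((n - 1 - y), (n - 1 - x))   -- x = n-1-x; y = n-1-y; x, y = y, x
    else (y, x)
  else (x, y)

def xy2dLoop (s : Int) (x y d : Int) : Int :=
  if h : 0 < s then
    let rx : Int := if 0 < PySem.Int.band x s then 1 else 0
    let ry : Int := if 0 < PySem.Int.band y s then 1 else 0
    let d' := d + s * s * (PySem.Int.bxor (3 * rx) ry)
    let xy := pyRot s x y rx ry
    xy2dLoop (s >>> (1:Nat)) xy.1 xy.2 d'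
  else d
termination_by s.toNat
decreasing_by
  simp only [Int.shiftRight_eq_div_pow]
  omega

def xy2d (p : Int) (x y : Int) : Int :=
  let n : Int := (1 : Int) <<< p.toNat   -- 1 << p; exact for 0 ≤ p (Python raises on p < 0, excluded by Pre_)
  xy2dLoop (n >>> (1:Nat)) x y 0

def hilbert_range_for_bbox (x_min : Int) (y_min : Int) (x_max : Int) (y_max : Int) (w : Int) (h_ : Int) (p : Int) : Int × Int :=
  let n : Int := (1 : Int) <<< p.toNat
  let corners_x : List Int := [x_min, x_min, x_max, x_max]
  let corners_y : List Int := [y_min, y_max, y_min, y_max]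
  let gxs := corners_x.map (fun cx => max 0 (min (n - 1) (pyFloatDivTrunc (cx * n) w)))
  let gys := corners_y.map (fun cy => max 0 (min (n - 1) (pyFloatDivTrunc (cy * n) h_)))
  let h_vals := (gxs.zip gys).map (fun g => xy2d p g.1 g.2)
  ((PySem.List.min? h_vals (fun v => v)).getD 0, (PySem.List.max? h_vals (fun v => v)).getD 0)
  -- getD 0 is never the fallback: h_vals has four elements

-- ===== PORT B =====
-- _DIGIT[st][q] and _NEXT[st][q] from Source B, as functions
def digitT (st q : Int) : Int :=
  if st = 0 then (if q = 0 then 0 else if q = 1 then 1 else if q = 2 then 3 else 2)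
  else if st = 1 then (if q = 0 then 0 else if q = 1 then 3 else if q = 2 then 1 else 2)
  else if st = 2 then (if q = 0 then 2 else if q = 1 then 1 else if q = 2 then 3 else 0)
  else (if q = 0 then 2 else if q = 1 then 3 else if q = 2 then 1 else 0)

def nextT (st q : Int) : Int :=
  if st = 0 then (if q = 0 then 1 else if q = 1 then 0 else if q = 2 then 2 else 0)
  else if st = 1 then (if q = 0 then 0 else if q = 1 then 3 else if q = 2 then 1 else 1)
  else if st = 2 then (if q = 0 then 2 else if q = 1 then 2 else if q = 2 then 0 else 3)
  else (if q = 0 then 3 else if q = 1 then 1 else if q = 2 then 3 else 2)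

def hilbStep (x y : Int) (a : Int × Int) (i : Nat) : Int × Int :=
  let bx := PySem.Int.mod (PySem.Int.floordiv x ((1:Int) <<< i)) 2
  let by_ := PySem.Int.mod (PySem.Int.floordiv y ((1:Int) <<< i)) 2
  let q := 2 * bx + by_
  (a.1 * 4 + digitT a.2 q, nextT a.2 q)

def hilbertD (p : Int) (x y : Int) : Int :=
  -- for i in reversed(range(p)): ...
  (((List.range p.toNat).reverse).foldl (hilbStep x y) (0, 0)).1

def gridB (c n denom : Int) : Int :=
  max 0 (min (n - 1) (pyFloatDivTrunc (c * n) denom))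

def hilbert_range_for_bbox_alt (x_min : Int) (y_min : Int) (x_max : Int) (y_max : Int) (w : Int) (h_ : Int) (p : Int) : Int × Int :=
  let n : Int := (1 : Int) <<< p.toNat
  let gx0 := gridB x_min n w
  let gx1 := gridB x_max n w
  let gy0 := gridB y_min n h_
  let gy1 := gridB y_max n h_
  let d00 := hilbertD p gx0 gy0
  let d01 := hilbertD p gx0 gy1
  let d10 := hilbertD p gx1 gy0
  let d11 := hilbertD p gx1 gy1
  (min (min (min d00 d01) d10) d11, max (max (max d00 d01) d10) d11)

-- ===== PRECONDITION & SPEC =====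
-- Pre_ excludes exactly the inputs where A raises: p < 0 (ValueError on the negative shift),
-- w = 0 / h = 0 (ZeroDivisionError), and corners whose quotient cx*n/w reaches the binary64
-- overflow threshold 2^1024 - 2^970 (OverflowError). The 'min p.toNat 1100' only caps the
-- computation of 2^p: for the divisor magnitudes Dom admits the capped test is exact.
def pvOvThreshold : Nat := 179769313486231580793728971405303415079934132710037826936173778980444968292764750946649017977587207096330286416692887910946555547851940402630657488671505820681908902000708383676273854845817711531764475730270069855571366959622842914819860834936475292719074168444365510704342711559699508093042880177904174497792  -- = 2^1024 - 2^970

def pvNoOverflow (c den p : Int) : Bool :=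
  c == 0 || decide (c.natAbs <<< (min p.toNat 1100) < pvOvThreshold * den.natAbs)

def Pre_hilbert_range_for_bbox (x_min : Int) (y_min : Int) (x_max : Int) (y_max : Int) (w : Int) (h_ : Int) (p : Int) : Prop :=
  0 ≤ p ∧ w ≠ 0 ∧ h_ ≠ 0 ∧
  (pvNoOverflow x_min w p && pvNoOverflow x_max w p &&
   pvNoOverflow y_min h_ p && pvNoOverflow y_max h_ p) = true

instance (x_min : Int) (y_min : Int) (x_max : Int) (y_max : Int) (w : Int) (h_ : Int) (p : Int) : Decidable (Pre_hilbert_range_for_bbox x_min y_min x_max y_max w h_ p) := by unfold Pre_hilbert_range_for_bbox; infer_instance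

def pvWitness_hilbert_range_for_bbox : Int × Int × Int × Int × Int × Int × Int := (1, 2, 7, 9, 10, 10, 4)

def Spec_hilbert_range_for_bbox (x_min : Int) (y_min : Int) (x_max : Int) (y_max : Int) (w : Int) (h_ : Int) (p : Int) (out : Int × Int) : Prop := out = hilbert_range_for_bbox_alt x_min y_min x_max y_max w h_ p
instance (x_min : Int) (y_min : Int) (x_max : Int) (y_max : Int) (w : Int) (h_ : Int) (p : Int) (out : Int × Int) : Decidable (Spec_hilbert_range_for_bbox x_min y_min x_max y_max w h_ p out) := by unfold Spec_hilbert_range_for_bbox; infer_instance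

-- ===== CLAIM (what is proved, stated in full; the proofs are below) =====
def Claim_equal_hilbert_range_for_bbox : Prop := ∀ (x_min : Int) (y_min : Int) (x_max : Int) (y_max : Int) (w : Int) (h_ : Int) (p : Int), Dom_hilbert_range_for_bbox x_min y_min x_max y_max w h_ p → Pre_hilbert_range_for_bbox x_min y_min x_max y_max w h_ p → Spec_hilbert_range_for_bbox x_min y_min x_max y_max w h_ p (hilbert_range_for_bbox x_min y_min x_max y_max w h_ p)

-- ===== LEMMAS AND PROOFS =====

-- A's per-level structure, one level per recursion step (s = 2^k processes bit k)
def Hd (k : Nat) (x y : Int) : Int :=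
  match k with
  | 0 => 0
  | Nat.succ k =>
    let s : Int := 2 ^ k
    let rx : Int := if 0 < PySem.Int.band x s then 1 else 0
    let ry : Int := if 0 < PySem.Int.band y s then 1 else 0
    let xy := pyRot s x y rx ry
    s * s * (PySem.Int.bxor (3 * rx) ry) + Hd k xy.1 xy.2

-- the coordinate transform named by B's DFA state st (M = 2^k - 1)
def appT (st : Int) (M x y : Int) : Int × Int :=
  if st = 0 then (x, y)
  else if st = 1 then (y, x)
  else if st = 2 then (M - y, M - x)
  else (M - x, M - y)

-- B's loop, peeled into structural recursion (bGo k processes bit indices k-1 … 0)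
def bGo (k : Nat) (x y : Int) (a : Int × Int) : Int × Int :=
  match k with
  | 0 => a
  | Nat.succ k => bGo k x y (hilbStep x y a k)

lemma int_one_shiftLeft (i : Nat) : (1 : Int) <<< i = ((2 ^ i : Nat) : Int) := by
  rw [Int.shiftLeft_eq]; push_cast; ring

lemma nat_bit_eq (a i : Nat) : a / 2 ^ i % 2 = if 2 ^ i ≤ a % 2 ^ (i + 1) then 1 else 0 := by
  have h1 : a % (2^i * 2) / 2^i = a / 2^i % 2 := Nat.mod_mul_right_div_self a (2^i) 2
  have hp : 0 < 2^i := Nat.two_pow_pos i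
  rw [pow_succ, ← h1]
  have h3 : a % (2^i*2) < 2^i*2 := Nat.mod_lt _ (by positivity)
  have hq : a % (2^i*2) / 2^i = if 2^i ≤ a % (2^i*2) then 1 else 0 := by
    split
    · exact Nat.div_eq_of_lt_le (by omega) (by omega)
    · exact Nat.div_eq_of_lt (by omega)
  rw [hq]

lemma band_two_pow (x : Int) (j : Nat) :
    PySem.Int.band x (2 ^ j) = if (2:Int) ^ j ≤ x % (2:Int) ^ (j + 1) then (2:Int) ^ j else 0 := by
  have hc : ((2:Int) ^ j) = ((2 ^ j : Nat) : Int) := by push_cast; ring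
  have hc1 : ((2:Int) ^ (j+1)) = ((2 ^ (j+1) : Nat) : Int) := by push_cast; ring
  by_cases hx : 0 ≤ x
  · obtain ⟨a, rfl⟩ : ∃ a : Nat, x = (a : Int) := ⟨x.toNat, (Int.toNat_of_nonneg hx).symm⟩
    rw [PySem.Int.band_of_nonneg hx (by positivity)]
    rw [hc1, hc]
    rw [Int.toNat_natCast, Int.toNat_natCast]
    rw [Nat.and_two_pow, Nat.testBit_eq_decide_div_mod_eq, nat_bit_eq]
    norm_cast
    by_cases hb : 2^j ≤ a % 2^(j+1) <;> simp [hb]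
  · -- x < 0 : band x (2^j) = 2^j - (2^j &&& (-x-1).toNat)
    obtain ⟨m, rfl⟩ : ∃ m : Nat, x = -1 - (m : Int) :=
      ⟨(-1 - x).toNat, by rw [Int.toNat_of_nonneg (by omega)]; ring⟩
    have hb2 : ¬ (0 : Int) ≤ -1 - (m:Int) := by omega
    have hpos : (0:Int) ≤ 2^j := by positivity
    rw [show PySem.Int.band (-1 - (m:Int)) (2^j) =
        (((2^j:Int).toNat - ((2^j:Int).toNat &&& (-(-1 - (m:Int)) - 1).toNat) : Nat) : Int) from by
      unfold PySem.Int.band; rw [if_neg hb2, if_pos hpos]]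
    have hm : (-(-1 - (m:Int)) - 1).toNat = m := by simp
    rw [hm, hc, Int.toNat_natCast, Nat.and_comm, Nat.and_two_pow,
        Nat.testBit_eq_decide_div_mod_eq, nat_bit_eq]
    have hMpos : (0:Int) < 2^(j+1) := by positivity
    have hrhs : (-1 - (m:Int)) % (2:Int)^(j+1) = (2:Int)^(j+1) - 1 - (m:Int) % (2:Int)^(j+1) := by
      have hmod := Int.emod_add_mul_ediv (m:Int) ((2:Int)^(j+1))
      have hsplit : (-1 - (m:Int)) = ((2:Int)^(j+1) - 1 - (m:Int) % (2:Int)^(j+1)) + (2:Int)^(j+1) * (-1 - (m:Int)/(2:Int)^(j+1)) := by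
        linarith [hmod]
      rw [hsplit, Int.add_mul_emod_self_left]
      have h0 : 0 ≤ (m:Int) % (2:Int)^(j+1) := Int.emod_nonneg _ (by positivity)
      have h1 : (m:Int) % (2:Int)^(j+1) < (2:Int)^(j+1) := Int.emod_lt_of_pos _ hMpos
      exact Int.emod_eq_of_lt (by omega) (by omega)
    rw [hrhs]
    have hcast : (m:Int) % (2:Int)^(j+1) = ((m % 2^(j+1) : Nat) : Int) := by
      rw [hc1]; exact_mod_cast (Int.natCast_mod m (2^(j+1))).symm
    rw [hcast]
    have hlt : m % 2^(j+1) < 2^(j+1) := Nat.mod_lt _ (by positivity)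
    have hpow : (2:Nat)^(j+1) = 2*2^j := by ring
    by_cases hb : 2^j ≤ m % 2^(j+1)
    · rw [if_pos hb, if_neg (by push_cast; omega)]
      norm_num
    · rw [if_neg hb, if_pos (by push_cast; omega)]
      norm_num

lemma loop_eq (k : Nat) : ∀ x y d : Int, xy2dLoop (2 ^ k) x y d = d + Hd (k + 1) x y := by
  induction k with
  | zero =>
    intro x y d
    rw [xy2dLoop]
    have h1 : ((2:Int)^0 >>> (1:Nat)) = 0 := by decide
    rw [h1, xy2dLoop]
    simp [Hd]
  | succ k ih =>
    intro x y d
    rw [xy2dLoop]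
    have hpos : (0:Int) < 2^(k+1) := by positivity
    have hsh : ((2:Int)^(k+1) >>> (1:Nat)) = 2^k := by
      rw [Int.shiftRight_eq_div_pow]
      have h2 : (2:Int)^(k+1) = 2^k * 2 := by ring
      rw [h2]; norm_num
    rw [dif_pos hpos, hsh, ih]
    show d + _ + Hd (k+1) _ _ = d + Hd (k+2) x y
    conv_rhs => rw [Hd]
    ring

lemma xy2d_eq_Hd (p : Int) (hp : 0 ≤ p) (x y : Int) : xy2d p x y = Hd p.toNat x y := by
  have hn : (1 : Int) <<< p.toNat = (2:Int) ^ p.toNat := by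
    rw [int_one_shiftLeft]; push_cast; ring
  show xy2dLoop (((1:Int) <<< p.toNat) >>> (1:Nat)) x y 0 = Hd p.toNat x y
  rw [hn]
  cases hk : p.toNat with
  | zero =>
    have h1 : ((2:Int)^0 >>> (1:Nat)) = 0 := by decide
    rw [h1, xy2dLoop]
    simp [Hd]
  | succ k =>
    have hsh : ((2:Int)^(k+1) >>> (1:Nat)) = 2^k := by
      rw [Int.shiftRight_eq_div_pow]
      have h2 : (2:Int)^(k+1) = 2^k * 2 := by ring
      rw [h2]; norm_num
    rw [hsh, loop_eq]
    ring

lemma Hd_congr (k : Nat) : ∀ x y x' y' : Int,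
    x % (2:Int) ^ k = x' % (2:Int) ^ k → y % (2:Int) ^ k = y' % (2:Int) ^ k →
    Hd k x y = Hd k x' y' := by
  induction k with
  | zero => intro x y x' y' _ _; rfl
  | succ k ih =>
    intro x y x' y' hx hy
    have hdvd : (2:Int)^k ∣ 2^(k+1) := ⟨2, by ring⟩
    have hx2 : x % (2:Int)^k = x' % (2:Int)^k := by
      rw [← Int.emod_emod_of_dvd x hdvd, hx, Int.emod_emod_of_dvd x' hdvd]
    have hy2 : y % (2:Int)^k = y' % (2:Int)^k := by
      rw [← Int.emod_emod_of_dvd y hdvd, hy, Int.emod_emod_of_dvd y' hdvd]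
    simp only [Hd, band_two_pow, hx, hy]
    by_cases h1 : (if (2:Int)^k ≤ x' % 2^(k+1) then (2:Int)^k else 0) > 0 <;>
      by_cases h2 : (if (2:Int)^k ≤ y' % 2^(k+1) then (2:Int)^k else 0) > 0 <;>
      simp only [h1, h2, if_true, if_false] <;>
      · congr 1
        simp only [pyRot]
        split_ifs <;>
          first
          | exact ih _ _ _ _ hy2 hx2
          | exact ih _ _ _ _ hx2 hy2
          | exact ih _ _ _ _ (by rw [Int.sub_emod, hy2, ← Int.sub_emod]) (by rw [Int.sub_emod, hx2, ← Int.sub_emod])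

lemma bGo_run (k : Nat) (x y : Int) (a : Int × Int) :
    ((List.range k).reverse).foldl (hilbStep x y) a = bGo k x y a := by
  induction k generalizing a with
  | zero => rfl
  | succ k ih => simp [List.range_succ, bGo, ih]

lemma bit_step (a : Nat) (i : Nat) :
    PySem.Int.mod (PySem.Int.floordiv ((a : Nat) : Int) ((1:Int) <<< i)) 2 = ((a / 2 ^ i % 2 : Nat) : Int) := by
  rw [int_one_shiftLeft, PySem.Int.floordiv_natCast]
  exact_mod_cast PySem.Int.mod_natCast (a / 2 ^ i) 2

lemma bGo_congr (k : Nat) : ∀ (a b a' b' : Nat) (st : Int × Int),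
    a % 2 ^ k = a' % 2 ^ k → b % 2 ^ k = b' % 2 ^ k →
    bGo k (a : Int) (b : Int) st = bGo k (a' : Int) (b' : Int) st := by
  induction k with
  | zero => intro a b a' b' st _ _; rfl
  | succ k ih =>
    intro a b a' b' st ha hb
    have hdvd : (2:Nat)^k ∣ 2^(k+1) := ⟨2, by ring⟩
    have ha2 : a % 2^k = a' % 2^k := by
      rw [← Nat.mod_mod_of_dvd a hdvd, ha, Nat.mod_mod_of_dvd a' hdvd]
    have hb2 : b % 2^k = b' % 2^k := by
      rw [← Nat.mod_mod_of_dvd b hdvd, hb, Nat.mod_mod_of_dvd b' hdvd]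
    show bGo k _ _ (hilbStep _ _ st k) = bGo k _ _ (hilbStep _ _ st k)
    have hstep : hilbStep (a:Int) (b:Int) st k = hilbStep (a':Int) (b':Int) st k := by
      simp only [hilbStep, bit_step, nat_bit_eq, ha, hb]
    rw [hstep]
    exact ih a b a' b' _ ha2 hb2

lemma emod_sub_self_pow (u : Int) (k : Nat) : (u - 2^k) % (2:Int)^k = u % 2^k := by
  conv_lhs => rw [show u - 2^k = u + 2^k * (-1) by ring, Int.add_mul_emod_self_left]

lemma Hd_succ (k : Nat) (u v : Int) (hu0 : 0 ≤ u) (hu1 : u < 2^(k+1)) (hv0 : 0 ≤ v) (hv1 : v < 2^(k+1)) :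
    Hd (k+1) u v =
      if 2^k ≤ u then
        (if 2^k ≤ v then 2^k*2^k*2 + Hd k (u - 2^k) (v - 2^k)
         else 2^k*2^k*3 + Hd k (2^k-1-v) (2^k-1-(u-2^k)))
      else
        (if 2^k ≤ v then 2^k*2^k*1 + Hd k u (v - 2^k)
         else Hd k v u) := by
  have hS0 : (0:Int) < 2^k := by positivity
  simp only [Hd, band_two_pow, Int.emod_eq_of_lt hu0 hu1, Int.emod_eq_of_lt hv0 hv1]
  by_cases hu : (2:Int)^k ≤ u <;> by_cases hv : (2:Int)^k ≤ v <;>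
    simp only [hu, hv, if_true, if_false, if_pos hS0, lt_irrefl, ite_true, ite_false]
  · -- rx = 1, ry = 1
    simp only [pyRot, if_pos hS0]
    norm_num
    rw [show PySem.Int.bxor 3 1 = 2 from by decide]
    rw [Hd_congr k u v (u - 2^k) (v - 2^k) (emod_sub_self_pow u k).symm (emod_sub_self_pow v k).symm]
  · -- rx = 1, ry = 0
    simp only [pyRot, if_pos hS0]
    norm_num
    exact Hd_congr k (2^k - 1 - v) (2^k - 1 - u) (2^k - 1 - v) (2^k - 1 - (u - 2^k)) rfl
      (by rw [show (2:Int)^k - 1 - (u - 2^k) = (2^k - 1 - u) - 2^k * (-1) by ring,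
              show ((2:Int)^k - 1 - u) - 2^k * (-1) = (2^k - 1 - u) + 2^k * 1 by ring,
              Int.add_mul_emod_self_left])
  · -- rx = 0, ry = 1
    simp only [pyRot]
    norm_num
    rw [Hd_congr k u v u (v - 2^k) rfl (emod_sub_self_pow v k).symm,
        show PySem.Int.bxor 0 1 = 1 from by decide]
    ring
  · -- rx = 0, ry = 0
    simp only [pyRot, if_pos hS0]
    norm_num

lemma main_lemma (k : Nat) : ∀ (st : Int), (st = 0 ∨ st = 1 ∨ st = 2 ∨ st = 3) →
    ∀ (a b : Nat), a < 2 ^ k → b < 2 ^ k → ∀ d : Int,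
    (bGo k (a : Int) (b : Int) (d, st)).1 =
      d * 4 ^ k + Hd k (appT st ((2:Int) ^ k - 1) a b).1 (appT st ((2:Int) ^ k - 1) a b).2 := by
  induction k with
  | zero =>
    intro st hst a b ha hb d
    rcases hst with rfl | rfl | rfl | rfl <;> simp [bGo, Hd]
  | succ k ih =>
    intro st hst a b ha hb d
    have hpowN : (2:Nat)^(k+1) = 2*2^k := by ring
    have hpowI : (2:Int)^(k+1) = 2*2^k := by ring
    have hS0 : (0:Int) < 2^k := by positivity
    have h4 : (4:Int)^k = 2^k*2^k := by rw [show (4:Int) = 2*2 by norm_num, mul_pow]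
    have hka : a % 2^(k+1) = a := Nat.mod_eq_of_lt ha
    have hkb : b % 2^(k+1) = b := Nat.mod_eq_of_lt hb
    have haI1 : ((a:Nat):Int) < 2^(k+1) := by exact_mod_cast ha
    have hbI1 : ((b:Nat):Int) < 2^(k+1) := by exact_mod_cast hb
    have haI0 : (0:Int) ≤ (a:Int) := by positivity
    have hbI0 : (0:Int) ≤ (b:Int) := by positivity
    show (bGo k (a:Int) (b:Int) (hilbStep (a:Int) (b:Int) (d, st) k)).1 = _
    simp only [hilbStep, bit_step, nat_bit_eq, hka, hkb]
    rcases hst with rfl | rfl | rfl | rfl <;> by_cases hA : 2^k ≤ a <;> by_cases hB : 2^k ≤ b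
    · -- st 0, bx 1, by 1
      have hAI : (2:Int)^k ≤ (a:Int) := by exact_mod_cast hA
      have hBI : (2:Int)^k ≤ (b:Int) := by exact_mod_cast hB
      rw [if_pos hA, if_pos hB]
      rw [show (2*((1:Nat):Int)+((1:Nat):Int)) = 3 from by norm_num]
      rw [show digitT 0 3 = 2 from by norm_num [digitT], show nextT 0 3 = 0 from by norm_num [nextT]]
      have hacong : a % 2^k = (a - 2^k) % 2^k := by
        conv_lhs => rw [show a = (a - 2^k) + 2^k from by omega]
        rw [Nat.add_mod_right]
      have hbcong : b % 2^k = (b - 2^k) % 2^k := by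
        conv_lhs => rw [show b = (b - 2^k) + 2^k from by omega]
        rw [Nat.add_mod_right]
      rw [bGo_congr k a b (a - 2^k) (b - 2^k) _ hacong hbcong]
      rw [ih 0 (by norm_num) (a - 2^k) (b - 2^k) (by omega) (by omega) (d*4+2)]
      rw [show appT 0 ((2:Int)^(k+1)-1) (a:Int) (b:Int) = ((a:Int), (b:Int)) from by norm_num [appT]]
      rw [Hd_succ k ((a:Int)) ((b:Int)) (by omega) (by omega) (by omega) (by omega)]
      rw [if_pos (show (2:Int)^k ≤ (a:Int) from by omega), if_pos (show (2:Int)^k ≤ (b:Int) from by omega)]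
      rw [show appT 0 ((2:Int)^k-1) ((a - 2^k : Nat):Int) ((b - 2^k : Nat):Int) = (((a - 2^k : Nat):Int), ((b - 2^k : Nat):Int)) from by norm_num [appT]]
      rw [Nat.cast_sub hA, Nat.cast_sub hB]
      push_cast
      rw [h4, pow_succ, h4]
      ring
    · -- st 0, bx 1, by 0
      have hAI : (2:Int)^k ≤ (a:Int) := by exact_mod_cast hA
      have hBI : ¬ (2:Int)^k ≤ (b:Int) := by exact_mod_cast hB
      rw [if_pos hA, if_neg hB]
      rw [show (2*((1:Nat):Int)+((0:Nat):Int)) = 2 from by norm_num]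
      rw [show digitT 0 2 = 3 from by norm_num [digitT], show nextT 0 2 = 2 from by norm_num [nextT]]
      have hacong : a % 2^k = (a - 2^k) % 2^k := by
        conv_lhs => rw [show a = (a - 2^k) + 2^k from by omega]
        rw [Nat.add_mod_right]
      rw [bGo_congr k a b (a - 2^k) b _ hacong rfl]
      rw [ih 2 (by norm_num) (a - 2^k) b (by omega) (by omega) (d*4+3)]
      rw [show appT 0 ((2:Int)^(k+1)-1) (a:Int) (b:Int) = ((a:Int), (b:Int)) from by norm_num [appT]]
      rw [Hd_succ k ((a:Int)) ((b:Int)) (by omega) (by omega) (by omega) (by omega)]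
      rw [if_pos (show (2:Int)^k ≤ (a:Int) from by omega), if_neg (show ¬ (2:Int)^k ≤ (b:Int) from by omega)]
      rw [show appT 2 ((2:Int)^k-1) ((a - 2^k : Nat):Int) (b:Int) = ((2:Int)^k-1-(b:Int), (2:Int)^k-1-((a - 2^k : Nat):Int)) from by norm_num [appT]]
      rw [Nat.cast_sub hA]
      push_cast
      rw [h4, pow_succ, h4]
      ring
    · -- st 0, bx 0, by 1
      have hAI : ¬ (2:Int)^k ≤ (a:Int) := by exact_mod_cast hA
      have hBI : (2:Int)^k ≤ (b:Int) := by exact_mod_cast hB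
      rw [if_neg hA, if_pos hB]
      rw [show (2*((0:Nat):Int)+((1:Nat):Int)) = 1 from by norm_num]
      rw [show digitT 0 1 = 1 from by norm_num [digitT], show nextT 0 1 = 0 from by norm_num [nextT]]
      have hbcong : b % 2^k = (b - 2^k) % 2^k := by
        conv_lhs => rw [show b = (b - 2^k) + 2^k from by omega]
        rw [Nat.add_mod_right]
      rw [bGo_congr k a b a (b - 2^k) _ rfl hbcong]
      rw [ih 0 (by norm_num) a (b - 2^k) (by omega) (by omega) (d*4+1)]
      rw [show appT 0 ((2:Int)^(k+1)-1) (a:Int) (b:Int) = ((a:Int), (b:Int)) from by norm_num [appT]]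
      rw [Hd_succ k ((a:Int)) ((b:Int)) (by omega) (by omega) (by omega) (by omega)]
      rw [if_neg (show ¬ (2:Int)^k ≤ (a:Int) from by omega), if_pos (show (2:Int)^k ≤ (b:Int) from by omega)]
      rw [show appT 0 ((2:Int)^k-1) (a:Int) ((b - 2^k : Nat):Int) = ((a:Int), ((b - 2^k : Nat):Int)) from by norm_num [appT]]
      rw [Nat.cast_sub hB]
      push_cast
      rw [h4, pow_succ, h4]
      ring
    · -- st 0, bx 0, by 0
      have hAI : ¬ (2:Int)^k ≤ (a:Int) := by exact_mod_cast hA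
      have hBI : ¬ (2:Int)^k ≤ (b:Int) := by exact_mod_cast hB
      rw [if_neg hA, if_neg hB]
      rw [show (2*((0:Nat):Int)+((0:Nat):Int)) = 0 from by norm_num]
      rw [show digitT 0 0 = 0 from by norm_num [digitT], show nextT 0 0 = 1 from by norm_num [nextT]]
      rw [bGo_congr k a b a b _ rfl rfl]
      rw [ih 1 (by norm_num) a b (by omega) (by omega) (d*4+0)]
      rw [show appT 0 ((2:Int)^(k+1)-1) (a:Int) (b:Int) = ((a:Int), (b:Int)) from by norm_num [appT]]
      rw [Hd_succ k ((a:Int)) ((b:Int)) (by omega) (by omega) (by omega) (by omega)]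
      rw [if_neg (show ¬ (2:Int)^k ≤ (a:Int) from by omega), if_neg (show ¬ (2:Int)^k ≤ (b:Int) from by omega)]
      rw [show appT 1 ((2:Int)^k-1) (a:Int) (b:Int) = ((b:Int), (a:Int)) from by norm_num [appT]]
      push_cast
      rw [h4, pow_succ, h4]
      ring
    · -- st 1, bx 1, by 1
      have hAI : (2:Int)^k ≤ (a:Int) := by exact_mod_cast hA
      have hBI : (2:Int)^k ≤ (b:Int) := by exact_mod_cast hB
      rw [if_pos hA, if_pos hB]
      rw [show (2*((1:Nat):Int)+((1:Nat):Int)) = 3 from by norm_num]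
      rw [show digitT 1 3 = 2 from by norm_num [digitT], show nextT 1 3 = 1 from by norm_num [nextT]]
      have hacong : a % 2^k = (a - 2^k) % 2^k := by
        conv_lhs => rw [show a = (a - 2^k) + 2^k from by omega]
        rw [Nat.add_mod_right]
      have hbcong : b % 2^k = (b - 2^k) % 2^k := by
        conv_lhs => rw [show b = (b - 2^k) + 2^k from by omega]
        rw [Nat.add_mod_right]
      rw [bGo_congr k a b (a - 2^k) (b - 2^k) _ hacong hbcong]
      rw [ih 1 (by norm_num) (a - 2^k) (b - 2^k) (by omega) (by omega) (d*4+2)]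
      rw [show appT 1 ((2:Int)^(k+1)-1) (a:Int) (b:Int) = ((b:Int), (a:Int)) from by norm_num [appT]]
      rw [Hd_succ k ((b:Int)) ((a:Int)) (by omega) (by omega) (by omega) (by omega)]
      rw [if_pos (show (2:Int)^k ≤ (b:Int) from by omega), if_pos (show (2:Int)^k ≤ (a:Int) from by omega)]
      rw [show appT 1 ((2:Int)^k-1) ((a - 2^k : Nat):Int) ((b - 2^k : Nat):Int) = (((b - 2^k : Nat):Int), ((a - 2^k : Nat):Int)) from by norm_num [appT]]
      rw [Nat.cast_sub hA, Nat.cast_sub hB]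
      push_cast
      rw [h4, pow_succ, h4]
      ring
    · -- st 1, bx 1, by 0
      have hAI : (2:Int)^k ≤ (a:Int) := by exact_mod_cast hA
      have hBI : ¬ (2:Int)^k ≤ (b:Int) := by exact_mod_cast hB
      rw [if_pos hA, if_neg hB]
      rw [show (2*((1:Nat):Int)+((0:Nat):Int)) = 2 from by norm_num]
      rw [show digitT 1 2 = 1 from by norm_num [digitT], show nextT 1 2 = 1 from by norm_num [nextT]]
      have hacong : a % 2^k = (a - 2^k) % 2^k := by
        conv_lhs => rw [show a = (a - 2^k) + 2^k from by omega]
        rw [Nat.add_mod_right]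
      rw [bGo_congr k a b (a - 2^k) b _ hacong rfl]
      rw [ih 1 (by norm_num) (a - 2^k) b (by omega) (by omega) (d*4+1)]
      rw [show appT 1 ((2:Int)^(k+1)-1) (a:Int) (b:Int) = ((b:Int), (a:Int)) from by norm_num [appT]]
      rw [Hd_succ k ((b:Int)) ((a:Int)) (by omega) (by omega) (by omega) (by omega)]
      rw [if_neg (show ¬ (2:Int)^k ≤ (b:Int) from by omega), if_pos (show (2:Int)^k ≤ (a:Int) from by omega)]
      rw [show appT 1 ((2:Int)^k-1) ((a - 2^k : Nat):Int) (b:Int) = ((b:Int), ((a - 2^k : Nat):Int)) from by norm_num [appT]]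
      rw [Nat.cast_sub hA]
      push_cast
      rw [h4, pow_succ, h4]
      ring
    · -- st 1, bx 0, by 1
      have hAI : ¬ (2:Int)^k ≤ (a:Int) := by exact_mod_cast hA
      have hBI : (2:Int)^k ≤ (b:Int) := by exact_mod_cast hB
      rw [if_neg hA, if_pos hB]
      rw [show (2*((0:Nat):Int)+((1:Nat):Int)) = 1 from by norm_num]
      rw [show digitT 1 1 = 3 from by norm_num [digitT], show nextT 1 1 = 3 from by norm_num [nextT]]
      have hbcong : b % 2^k = (b - 2^k) % 2^k := by
        conv_lhs => rw [show b = (b - 2^k) + 2^k from by omega]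
        rw [Nat.add_mod_right]
      rw [bGo_congr k a b a (b - 2^k) _ rfl hbcong]
      rw [ih 3 (by norm_num) a (b - 2^k) (by omega) (by omega) (d*4+3)]
      rw [show appT 1 ((2:Int)^(k+1)-1) (a:Int) (b:Int) = ((b:Int), (a:Int)) from by norm_num [appT]]
      rw [Hd_succ k ((b:Int)) ((a:Int)) (by omega) (by omega) (by omega) (by omega)]
      rw [if_pos (show (2:Int)^k ≤ (b:Int) from by omega), if_neg (show ¬ (2:Int)^k ≤ (a:Int) from by omega)]
      rw [show appT 3 ((2:Int)^k-1) (a:Int) ((b - 2^k : Nat):Int) = ((2:Int)^k-1-(a:Int), (2:Int)^k-1-((b - 2^k : Nat):Int)) from by norm_num [appT]]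
      rw [Nat.cast_sub hB]
      push_cast
      rw [h4, pow_succ, h4]
      ring
    · -- st 1, bx 0, by 0
      have hAI : ¬ (2:Int)^k ≤ (a:Int) := by exact_mod_cast hA
      have hBI : ¬ (2:Int)^k ≤ (b:Int) := by exact_mod_cast hB
      rw [if_neg hA, if_neg hB]
      rw [show (2*((0:Nat):Int)+((0:Nat):Int)) = 0 from by norm_num]
      rw [show digitT 1 0 = 0 from by norm_num [digitT], show nextT 1 0 = 0 from by norm_num [nextT]]
      rw [bGo_congr k a b a b _ rfl rfl]
      rw [ih 0 (by norm_num) a b (by omega) (by omega) (d*4+0)]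
      rw [show appT 1 ((2:Int)^(k+1)-1) (a:Int) (b:Int) = ((b:Int), (a:Int)) from by norm_num [appT]]
      rw [Hd_succ k ((b:Int)) ((a:Int)) (by omega) (by omega) (by omega) (by omega)]
      rw [if_neg (show ¬ (2:Int)^k ≤ (b:Int) from by omega), if_neg (show ¬ (2:Int)^k ≤ (a:Int) from by omega)]
      rw [show appT 0 ((2:Int)^k-1) (a:Int) (b:Int) = ((a:Int), (b:Int)) from by norm_num [appT]]
      push_cast
      rw [h4, pow_succ, h4]
      ring
    · -- st 2, bx 1, by 1
      have hAI : (2:Int)^k ≤ (a:Int) := by exact_mod_cast hA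
      have hBI : (2:Int)^k ≤ (b:Int) := by exact_mod_cast hB
      rw [if_pos hA, if_pos hB]
      rw [show (2*((1:Nat):Int)+((1:Nat):Int)) = 3 from by norm_num]
      rw [show digitT 2 3 = 0 from by norm_num [digitT], show nextT 2 3 = 3 from by norm_num [nextT]]
      have hacong : a % 2^k = (a - 2^k) % 2^k := by
        conv_lhs => rw [show a = (a - 2^k) + 2^k from by omega]
        rw [Nat.add_mod_right]
      have hbcong : b % 2^k = (b - 2^k) % 2^k := by
        conv_lhs => rw [show b = (b - 2^k) + 2^k from by omega]
        rw [Nat.add_mod_right]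
      rw [bGo_congr k a b (a - 2^k) (b - 2^k) _ hacong hbcong]
      rw [ih 3 (by norm_num) (a - 2^k) (b - 2^k) (by omega) (by omega) (d*4+0)]
      rw [show appT 2 ((2:Int)^(k+1)-1) (a:Int) (b:Int) = ((2:Int)^(k+1)-1-(b:Int), (2:Int)^(k+1)-1-(a:Int)) from by norm_num [appT]]
      rw [Hd_succ k ((2:Int)^(k+1)-1-(b:Int)) ((2:Int)^(k+1)-1-(a:Int)) (by omega) (by omega) (by omega) (by omega)]
      rw [if_neg (show ¬ (2:Int)^k ≤ (2:Int)^(k+1)-1-(b:Int) from by omega), if_neg (show ¬ (2:Int)^k ≤ (2:Int)^(k+1)-1-(a:Int) from by omega)]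
      rw [show appT 3 ((2:Int)^k-1) ((a - 2^k : Nat):Int) ((b - 2^k : Nat):Int) = ((2:Int)^k-1-((a - 2^k : Nat):Int), (2:Int)^k-1-((b - 2^k : Nat):Int)) from by norm_num [appT]]
      rw [Nat.cast_sub hA, Nat.cast_sub hB]
      push_cast
      rw [h4, pow_succ, h4]
      ring
    · -- st 2, bx 1, by 0
      have hAI : (2:Int)^k ≤ (a:Int) := by exact_mod_cast hA
      have hBI : ¬ (2:Int)^k ≤ (b:Int) := by exact_mod_cast hB
      rw [if_pos hA, if_neg hB]
      rw [show (2*((1:Nat):Int)+((0:Nat):Int)) = 2 from by norm_num]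
      rw [show digitT 2 2 = 3 from by norm_num [digitT], show nextT 2 2 = 0 from by norm_num [nextT]]
      have hacong : a % 2^k = (a - 2^k) % 2^k := by
        conv_lhs => rw [show a = (a - 2^k) + 2^k from by omega]
        rw [Nat.add_mod_right]
      rw [bGo_congr k a b (a - 2^k) b _ hacong rfl]
      rw [ih 0 (by norm_num) (a - 2^k) b (by omega) (by omega) (d*4+3)]
      rw [show appT 2 ((2:Int)^(k+1)-1) (a:Int) (b:Int) = ((2:Int)^(k+1)-1-(b:Int), (2:Int)^(k+1)-1-(a:Int)) from by norm_num [appT]]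
      rw [Hd_succ k ((2:Int)^(k+1)-1-(b:Int)) ((2:Int)^(k+1)-1-(a:Int)) (by omega) (by omega) (by omega) (by omega)]
      rw [if_pos (show (2:Int)^k ≤ (2:Int)^(k+1)-1-(b:Int) from by omega), if_neg (show ¬ (2:Int)^k ≤ (2:Int)^(k+1)-1-(a:Int) from by omega)]
      rw [show appT 0 ((2:Int)^k-1) ((a - 2^k : Nat):Int) (b:Int) = (((a - 2^k : Nat):Int), (b:Int)) from by norm_num [appT]]
      rw [Nat.cast_sub hA]
      push_cast
      rw [h4, pow_succ, h4]
      ring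
    · -- st 2, bx 0, by 1
      have hAI : ¬ (2:Int)^k ≤ (a:Int) := by exact_mod_cast hA
      have hBI : (2:Int)^k ≤ (b:Int) := by exact_mod_cast hB
      rw [if_neg hA, if_pos hB]
      rw [show (2*((0:Nat):Int)+((1:Nat):Int)) = 1 from by norm_num]
      rw [show digitT 2 1 = 1 from by norm_num [digitT], show nextT 2 1 = 2 from by norm_num [nextT]]
      have hbcong : b % 2^k = (b - 2^k) % 2^k := by
        conv_lhs => rw [show b = (b - 2^k) + 2^k from by omega]
        rw [Nat.add_mod_right]
      rw [bGo_congr k a b a (b - 2^k) _ rfl hbcong]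
      rw [ih 2 (by norm_num) a (b - 2^k) (by omega) (by omega) (d*4+1)]
      rw [show appT 2 ((2:Int)^(k+1)-1) (a:Int) (b:Int) = ((2:Int)^(k+1)-1-(b:Int), (2:Int)^(k+1)-1-(a:Int)) from by norm_num [appT]]
      rw [Hd_succ k ((2:Int)^(k+1)-1-(b:Int)) ((2:Int)^(k+1)-1-(a:Int)) (by omega) (by omega) (by omega) (by omega)]
      rw [if_neg (show ¬ (2:Int)^k ≤ (2:Int)^(k+1)-1-(b:Int) from by omega), if_pos (show (2:Int)^k ≤ (2:Int)^(k+1)-1-(a:Int) from by omega)]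
      rw [show appT 2 ((2:Int)^k-1) (a:Int) ((b - 2^k : Nat):Int) = ((2:Int)^k-1-((b - 2^k : Nat):Int), (2:Int)^k-1-(a:Int)) from by norm_num [appT]]
      rw [Nat.cast_sub hB]
      push_cast
      rw [h4, pow_succ, h4]
      ring
    · -- st 2, bx 0, by 0
      have hAI : ¬ (2:Int)^k ≤ (a:Int) := by exact_mod_cast hA
      have hBI : ¬ (2:Int)^k ≤ (b:Int) := by exact_mod_cast hB
      rw [if_neg hA, if_neg hB]
      rw [show (2*((0:Nat):Int)+((0:Nat):Int)) = 0 from by norm_num]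
      rw [show digitT 2 0 = 2 from by norm_num [digitT], show nextT 2 0 = 2 from by norm_num [nextT]]
      rw [bGo_congr k a b a b _ rfl rfl]
      rw [ih 2 (by norm_num) a b (by omega) (by omega) (d*4+2)]
      rw [show appT 2 ((2:Int)^(k+1)-1) (a:Int) (b:Int) = ((2:Int)^(k+1)-1-(b:Int), (2:Int)^(k+1)-1-(a:Int)) from by norm_num [appT]]
      rw [Hd_succ k ((2:Int)^(k+1)-1-(b:Int)) ((2:Int)^(k+1)-1-(a:Int)) (by omega) (by omega) (by omega) (by omega)]
      rw [if_pos (show (2:Int)^k ≤ (2:Int)^(k+1)-1-(b:Int) from by omega), if_pos (show (2:Int)^k ≤ (2:Int)^(k+1)-1-(a:Int) from by omega)]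
      rw [show appT 2 ((2:Int)^k-1) (a:Int) (b:Int) = ((2:Int)^k-1-(b:Int), (2:Int)^k-1-(a:Int)) from by norm_num [appT]]
      push_cast
      rw [h4, pow_succ, h4]
      ring
    · -- st 3, bx 1, by 1
      have hAI : (2:Int)^k ≤ (a:Int) := by exact_mod_cast hA
      have hBI : (2:Int)^k ≤ (b:Int) := by exact_mod_cast hB
      rw [if_pos hA, if_pos hB]
      rw [show (2*((1:Nat):Int)+((1:Nat):Int)) = 3 from by norm_num]
      rw [show digitT 3 3 = 0 from by norm_num [digitT], show nextT 3 3 = 2 from by norm_num [nextT]]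
      have hacong : a % 2^k = (a - 2^k) % 2^k := by
        conv_lhs => rw [show a = (a - 2^k) + 2^k from by omega]
        rw [Nat.add_mod_right]
      have hbcong : b % 2^k = (b - 2^k) % 2^k := by
        conv_lhs => rw [show b = (b - 2^k) + 2^k from by omega]
        rw [Nat.add_mod_right]
      rw [bGo_congr k a b (a - 2^k) (b - 2^k) _ hacong hbcong]
      rw [ih 2 (by norm_num) (a - 2^k) (b - 2^k) (by omega) (by omega) (d*4+0)]
      rw [show appT 3 ((2:Int)^(k+1)-1) (a:Int) (b:Int) = ((2:Int)^(k+1)-1-(a:Int), (2:Int)^(k+1)-1-(b:Int)) from by norm_num [appT]]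
      rw [Hd_succ k ((2:Int)^(k+1)-1-(a:Int)) ((2:Int)^(k+1)-1-(b:Int)) (by omega) (by omega) (by omega) (by omega)]
      rw [if_neg (show ¬ (2:Int)^k ≤ (2:Int)^(k+1)-1-(a:Int) from by omega), if_neg (show ¬ (2:Int)^k ≤ (2:Int)^(k+1)-1-(b:Int) from by omega)]
      rw [show appT 2 ((2:Int)^k-1) ((a - 2^k : Nat):Int) ((b - 2^k : Nat):Int) = ((2:Int)^k-1-((b - 2^k : Nat):Int), (2:Int)^k-1-((a - 2^k : Nat):Int)) from by norm_num [appT]]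
      rw [Nat.cast_sub hA, Nat.cast_sub hB]
      push_cast
      rw [h4, pow_succ, h4]
      ring
    · -- st 3, bx 1, by 0
      have hAI : (2:Int)^k ≤ (a:Int) := by exact_mod_cast hA
      have hBI : ¬ (2:Int)^k ≤ (b:Int) := by exact_mod_cast hB
      rw [if_pos hA, if_neg hB]
      rw [show (2*((1:Nat):Int)+((0:Nat):Int)) = 2 from by norm_num]
      rw [show digitT 3 2 = 1 from by norm_num [digitT], show nextT 3 2 = 3 from by norm_num [nextT]]
      have hacong : a % 2^k = (a - 2^k) % 2^k := by
        conv_lhs => rw [show a = (a - 2^k) + 2^k from by omega]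
        rw [Nat.add_mod_right]
      rw [bGo_congr k a b (a - 2^k) b _ hacong rfl]
      rw [ih 3 (by norm_num) (a - 2^k) b (by omega) (by omega) (d*4+1)]
      rw [show appT 3 ((2:Int)^(k+1)-1) (a:Int) (b:Int) = ((2:Int)^(k+1)-1-(a:Int), (2:Int)^(k+1)-1-(b:Int)) from by norm_num [appT]]
      rw [Hd_succ k ((2:Int)^(k+1)-1-(a:Int)) ((2:Int)^(k+1)-1-(b:Int)) (by omega) (by omega) (by omega) (by omega)]
      rw [if_neg (show ¬ (2:Int)^k ≤ (2:Int)^(k+1)-1-(a:Int) from by omega), if_pos (show (2:Int)^k ≤ (2:Int)^(k+1)-1-(b:Int) from by omega)]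
      rw [show appT 3 ((2:Int)^k-1) ((a - 2^k : Nat):Int) (b:Int) = ((2:Int)^k-1-((a - 2^k : Nat):Int), (2:Int)^k-1-(b:Int)) from by norm_num [appT]]
      rw [Nat.cast_sub hA]
      push_cast
      rw [h4, pow_succ, h4]
      ring
    · -- st 3, bx 0, by 1
      have hAI : ¬ (2:Int)^k ≤ (a:Int) := by exact_mod_cast hA
      have hBI : (2:Int)^k ≤ (b:Int) := by exact_mod_cast hB
      rw [if_neg hA, if_pos hB]
      rw [show (2*((0:Nat):Int)+((1:Nat):Int)) = 1 from by norm_num]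
      rw [show digitT 3 1 = 3 from by norm_num [digitT], show nextT 3 1 = 1 from by norm_num [nextT]]
      have hbcong : b % 2^k = (b - 2^k) % 2^k := by
        conv_lhs => rw [show b = (b - 2^k) + 2^k from by omega]
        rw [Nat.add_mod_right]
      rw [bGo_congr k a b a (b - 2^k) _ rfl hbcong]
      rw [ih 1 (by norm_num) a (b - 2^k) (by omega) (by omega) (d*4+3)]
      rw [show appT 3 ((2:Int)^(k+1)-1) (a:Int) (b:Int) = ((2:Int)^(k+1)-1-(a:Int), (2:Int)^(k+1)-1-(b:Int)) from by norm_num [appT]]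
      rw [Hd_succ k ((2:Int)^(k+1)-1-(a:Int)) ((2:Int)^(k+1)-1-(b:Int)) (by omega) (by omega) (by omega) (by omega)]
      rw [if_pos (show (2:Int)^k ≤ (2:Int)^(k+1)-1-(a:Int) from by omega), if_neg (show ¬ (2:Int)^k ≤ (2:Int)^(k+1)-1-(b:Int) from by omega)]
      rw [show appT 1 ((2:Int)^k-1) (a:Int) ((b - 2^k : Nat):Int) = (((b - 2^k : Nat):Int), (a:Int)) from by norm_num [appT]]
      rw [Nat.cast_sub hB]
      push_cast
      rw [h4, pow_succ, h4]
      ring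
    · -- st 3, bx 0, by 0
      have hAI : ¬ (2:Int)^k ≤ (a:Int) := by exact_mod_cast hA
      have hBI : ¬ (2:Int)^k ≤ (b:Int) := by exact_mod_cast hB
      rw [if_neg hA, if_neg hB]
      rw [show (2*((0:Nat):Int)+((0:Nat):Int)) = 0 from by norm_num]
      rw [show digitT 3 0 = 2 from by norm_num [digitT], show nextT 3 0 = 3 from by norm_num [nextT]]
      rw [bGo_congr k a b a b _ rfl rfl]
      rw [ih 3 (by norm_num) a b (by omega) (by omega) (d*4+2)]
      rw [show appT 3 ((2:Int)^(k+1)-1) (a:Int) (b:Int) = ((2:Int)^(k+1)-1-(a:Int), (2:Int)^(k+1)-1-(b:Int)) from by norm_num [appT]]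
      rw [Hd_succ k ((2:Int)^(k+1)-1-(a:Int)) ((2:Int)^(k+1)-1-(b:Int)) (by omega) (by omega) (by omega) (by omega)]
      rw [if_pos (show (2:Int)^k ≤ (2:Int)^(k+1)-1-(a:Int) from by omega), if_pos (show (2:Int)^k ≤ (2:Int)^(k+1)-1-(b:Int) from by omega)]
      rw [show appT 3 ((2:Int)^k-1) (a:Int) (b:Int) = ((2:Int)^k-1-(a:Int), (2:Int)^k-1-(b:Int)) from by norm_num [appT]]
      push_cast
      rw [h4, pow_succ, h4]
      ring

lemma core_eq (p : Int) (hp : 0 ≤ p) (x y : Int)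
    (hx0 : 0 ≤ x) (hx1 : x < (2:Int) ^ p.toNat) (hy0 : 0 ≤ y) (hy1 : y < (2:Int) ^ p.toNat) :
    xy2d p x y = hilbertD p x y := by
  rw [xy2d_eq_Hd p hp]
  unfold hilbertD
  rw [bGo_run]
  have hcast : (((2:Nat)^p.toNat : Nat) : Int) = (2:Int)^p.toNat := by push_cast; ring
  have hxeq : x = ((x.toNat : Nat) : Int) := (Int.toNat_of_nonneg hx0).symm
  have hyeq : y = ((y.toNat : Nat) : Int) := (Int.toNat_of_nonneg hy0).symm
  have ha : x.toNat < 2^p.toNat := by omega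
  have hb : y.toNat < 2^p.toNat := by omega
  rw [hxeq, hyeq]
  rw [main_lemma p.toNat 0 (Or.inl rfl) x.toNat y.toNat ha hb 0]
  rw [show appT 0 ((2:Int)^p.toNat-1) ((x.toNat : Nat):Int) ((y.toNat : Nat):Int) = (((x.toNat : Nat):Int), ((y.toNat : Nat):Int)) from by norm_num [appT]]
  ring

lemma grid_eq (c n denom : Int) :
    max 0 (min (n - 1) (pyFloatDivTrunc (c * n) denom)) = gridB c n denom := rfl

lemma gridB_bounds (c n denom : Int) (hn : 0 < n) : 0 ≤ gridB c n denom ∧ gridB c n denom < n := by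
  unfold gridB
  refine ⟨le_max_left _ _, max_lt hn ?_⟩
  have h1 := min_le_left (n - 1) (pyFloatDivTrunc (c * n) denom)
  omega

-- ===== VERDICT (by name: the statement is the Claim_ definition above) =====
theorem hilbert_range_for_bbox_spec : Claim_equal_hilbert_range_for_bbox := by
  unfold Claim_equal_hilbert_range_for_bbox
  intro x_min y_min x_max y_max w h_ p _ hpre
  obtain ⟨hp0, _, _, _⟩ := hpre
  unfold Spec_hilbert_range_for_bbox hilbert_range_for_bbox hilbert_range_for_bbox_alt
  have hN : (1:Int) <<< p.toNat = (2:Int)^p.toNat := by rw [int_one_shiftLeft]; push_cast; ring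
  have hNpos : (0:Int) < (2:Int)^p.toNat := by positivity
  rw [hN]
  simp only [List.map_cons, List.map_nil, List.zip_cons_cons, List.zip_nil_right]
  rw [PySem.List.min?_id_cons, PySem.List.max?_id_cons]
  simp only [List.foldl, Option.getD_some]
  simp only [grid_eq]
  have hb1 := gridB_bounds x_min ((2:Int)^p.toNat) w hNpos
  have hb2 := gridB_bounds x_max ((2:Int)^p.toNat) w hNpos
  have hb3 := gridB_bounds y_min ((2:Int)^p.toNat) h_ hNpos
  have hb4 := gridB_bounds y_max ((2:Int)^p.toNat) h_ hNpos
  rw [core_eq p hp0 _ _ hb1.1 hb1.2 hb3.1 hb3.2,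
      core_eq p hp0 _ _ hb1.1 hb1.2 hb4.1 hb4.2,
      core_eq p hp0 _ _ hb2.1 hb2.2 hb3.1 hb3.2,
      core_eq p hp0 _ _ hb2.1 hb2.2 hb4.1 hb4.2]
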